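-- pv_equiv track=rewrite | github.com/NTQuang13/Playfair-RSA | playfair.py | process_plaintext_6x6
-- ===== SOURCE A (Python) =====
-- def is_ascii_alnum(char):
--     """Kiểm tra ký tự A-Z hoặc 0-9 không dấu"""
--     c = char.upper()
--     return ('A' <= c <= 'Z') or ('0' <= c <= '9')
--
-- def process_plaintext_6x6(text, sep1='X', sep2='Y'):
--     """Xử lý văn bản 6x6: Tách cặp, chèn sep1/sep2 nếu trùng hoặc lẻ"""
--     text = ''.join([c.upper() for c in text if is_ascii_alnum(c)])
--
--     pairs = []
--     inserted_indices = []
--     i = 0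
--     char_count = 0
--
--     while i < len(text):
--         a = text[i]
--         if i + 1 < len(text):
--             b = text[i + 1]
--             if a == b:
--                 if a == sep1: pairs.append(a + sep2)
--                 else: pairs.append(a + sep1)
--                 inserted_indices.append(char_count + 1)
--                 i += 1
--                 char_count += 2
--             else:
--                 pairs.append(a + b)
--                 i += 2
--                 char_count += 2
--         else:
--             if a == sep1: pairs.append(a + sep2)
--             else: pairs.append(a + sep1)
--             inserted_indices.append(char_count + 1)
--             i += 1
--             char_count += 2
--
--     return pairs, inserted_indices
-- ===== SOURCE B (Python) =====
-- def is_ascii_alnum(char):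
--     c = char.upper()
--     return ('A' <= c <= 'Z') or ('0' <= c <= '9')
--
-- def process_plaintext_6x6(text, sep1='X', sep2='Y'):
--     cleaned = [c.upper() for c in text if is_ascii_alnum(c)]
--     pairs = []
--     inserted_indices = []
--     pending = None
--     for c in cleaned:
--         if pending is None:
--             pending = c
--         elif pending == c:
--             inserted_indices.append(2 * len(pairs) + 1)
--             pairs.append(pending + (sep2 if pending == sep1 else sep1))
--             # the repeated char stays pending
--         else:
--             pairs.append(pending + c)
--             pending = None
--     if pending is not None:
--         inserted_indices.append(2 * len(pairs) + 1)
--         pairs.append(pending + (sep2 if pending == sep1 else sep1))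
--     return pairs, inserted_indices
-- ===== Notes on version B (the rewrite author's own statement) =====
-- stated objective: simpler
-- what changed: Replaces A's while-loop with index lookahead and an explicit char_count counter by a single streaming pass keeping one pending character, deriving each inserted index as 2*len(pairs)+1.
import Mathlib
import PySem

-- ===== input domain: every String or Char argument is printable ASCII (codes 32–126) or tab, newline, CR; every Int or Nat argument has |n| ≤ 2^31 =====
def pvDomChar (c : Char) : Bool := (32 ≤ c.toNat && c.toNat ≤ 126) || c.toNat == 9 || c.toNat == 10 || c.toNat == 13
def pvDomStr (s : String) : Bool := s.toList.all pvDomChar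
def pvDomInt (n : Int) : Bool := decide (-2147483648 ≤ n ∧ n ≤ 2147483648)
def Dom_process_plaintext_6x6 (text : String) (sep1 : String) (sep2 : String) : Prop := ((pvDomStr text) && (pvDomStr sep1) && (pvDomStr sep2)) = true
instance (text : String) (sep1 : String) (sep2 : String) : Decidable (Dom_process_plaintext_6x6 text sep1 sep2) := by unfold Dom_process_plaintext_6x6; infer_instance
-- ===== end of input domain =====

-- B replaces A's index/lookahead while-loop and char_count counter with a single-pass
-- fold keeping one pending character (objective: simpler decomposition, same cost).

-- ===== PORT A =====
def pvIsAsciiAlnum (c : Char) : Bool :=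
  let u := PySem.Chars.upperChar c
  (decide ('A' ≤ u) && decide (u ≤ 'Z')) || (decide ('0' ≤ u) && decide (u ≤ '9'))

def pvClean (text : String) : List Char :=
  (text.toList.filter pvIsAsciiAlnum).map PySem.Chars.upperChar

def pvOdd (a : Char) (sep1 sep2 : String) : String :=
  if String.ofList [a] == sep1 then String.ofList [a] ++ sep2 else String.ofList [a] ++ sep1

-- A's while loop over the cleaned text: the equal branch advances i by 1 (keeping b),
-- the unequal branch by 2; char_count is the accumulator cc.
def pvLoopA (sep1 sep2 : String) (cs : List Char) (cc : Int) : List String × List Int :=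
  match cs with
  | [] => ([], [])
  | [a] => ([pvOdd a sep1 sep2], [cc + 1])
  | a :: b :: rest =>
    if a == b then
      let r := pvLoopA sep1 sep2 (b :: rest) (cc + 2)
      (pvOdd a sep1 sep2 :: r.1, (cc + 1) :: r.2)
    else
      let r := pvLoopA sep1 sep2 rest (cc + 2)
      ((String.ofList [a] ++ String.ofList [b]) :: r.1, r.2)

def process_plaintext_6x6 (text : String) (sep1 : String) (sep2 : String) : List String × List Int :=
  pvLoopA sep1 sep2 (pvClean text) 0

-- ===== PORT B =====
-- B's for loop: state = (pairs, inserted_indices, pending)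
def pvStepB (sep1 sep2 : String) (st : List String × List Int × Option Char) (c : Char) :
    List String × List Int × Option Char :=
  match st with
  | (pairs, ins, none) => (pairs, ins, some c)
  | (pairs, ins, some p) =>
    if p == c then
      (pairs ++ [pvOdd p sep1 sep2], ins ++ [2 * (pairs.length : Int) + 1], some c)
    else
      (pairs ++ [String.ofList [p] ++ String.ofList [c]], ins, none)

def pvFinishB (sep1 sep2 : String) (st : List String × List Int × Option Char) :
    List String × List Int :=
  match st with
  | (pairs, ins, none) => (pairs, ins)
  | (pairs, ins, some p) => (pairs ++ [pvOdd p sep1 sep2], ins ++ [2 * (pairs.length : Int) + 1])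

def process_plaintext_6x6_alt (text : String) (sep1 : String) (sep2 : String) : List String × List Int :=
  pvFinishB sep1 sep2 ((pvClean text).foldl (pvStepB sep1 sep2) ([], [], none))

-- ===== PRECONDITION & SPEC =====
def Spec_process_plaintext_6x6 (text : String) (sep1 : String) (sep2 : String) (out : List String × List Int) : Prop := out = process_plaintext_6x6_alt text sep1 sep2
instance (text : String) (sep1 : String) (sep2 : String) (out : List String × List Int) : Decidable (Spec_process_plaintext_6x6 text sep1 sep2 out) := by unfold Spec_process_plaintext_6x6; infer_instance

-- ===== CLAIM (what is proved, stated in full; the proofs are below) =====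
def Claim_equal_process_plaintext_6x6 : Prop := ∀ (text : String) (sep1 : String) (sep2 : String), Dom_process_plaintext_6x6 text sep1 sep2 → Spec_process_plaintext_6x6 text sep1 sep2 (process_plaintext_6x6 text sep1 sep2)

-- ===== LEMMAS AND PROOFS =====

def pvPend (p? : Option Char) : List Char :=
  match p? with | none => [] | some p => [p]

-- Invariant: folding B's step from state (pairs, ins, pending) and finishing equals
-- appending A's loop result on (pending ++ rest) started at char_count = 2·|pairs|.
theorem pvInv (sep1 sep2 : String) (cs : List Char) :
    ∀ (pairs : List String) (ins : List Int) (p? : Option Char),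
      pvFinishB sep1 sep2 (cs.foldl (pvStepB sep1 sep2) (pairs, ins, p?)) =
        (pairs ++ (pvLoopA sep1 sep2 (pvPend p? ++ cs) (2 * (pairs.length : Int))).1,
         ins ++ (pvLoopA sep1 sep2 (pvPend p? ++ cs) (2 * (pairs.length : Int))).2) := by
  induction cs with
  | nil =>
    intro pairs ins p?
    cases p? with
    | none => simp [pvFinishB, pvPend, pvLoopA]
    | some p => simp [pvFinishB, pvPend, pvLoopA]
  | cons c cs ih =>
    intro pairs ins p?
    cases p? with
    | none =>
      simp only [List.foldl_cons, pvStepB]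
      simpa [pvPend] using ih pairs ins (some c)
    | some p =>
      simp only [List.foldl_cons, pvStepB, pvPend, List.singleton_append]
      by_cases h : p = c
      · subst h
        simp only [beq_self_eq_true, if_true]
        rw [ih (pairs ++ [pvOdd p sep1 sep2]) (ins ++ [2 * (pairs.length : Int) + 1]) (some p)]
        simp [pvLoopA, pvPend, mul_add]
      · simp only [beq_iff_eq, h, if_false]
        rw [ih (pairs ++ [String.ofList [p] ++ String.ofList [c]]) ins none]
        simp [pvLoopA, pvPend, h, mul_add]

-- ===== VERDICT (by name: the statement is the Claim_ definition above) =====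
theorem process_plaintext_6x6_spec : Claim_equal_process_plaintext_6x6 := by
  intro text sep1 sep2 _
  show _ = _
  unfold process_plaintext_6x6 process_plaintext_6x6_alt
  rw [pvInv sep1 sep2 (pvClean text) [] [] none]
  simp [pvPend]
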